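-- pv_equiv track=rewrite | github.com/ldct/cp | usaco/2021_feb/A/A.py | p1_wins_sc
-- ===== SOURCE A (Python) =====
-- def p1_wins_sc(A):
--     for a in A:
--         assert(a > 0)
--
--     if len(A) == 2: return A[0] != A[1]
--
--     mA = max(A)
--     piles = 0
--     for a in A:
--         if a == mA:
--             piles += 1
--
--     if piles % 2 == 1:
--         return True
--
--     return None
-- ===== SOURCE B (Python) =====
-- def p1_wins_sc(A):
--     assert all(a > 0 for a in A)
--
--     if len(A) == 2:
--         return A[0] != A[1]
--
--     s = sorted(A, reverse=True)
--     piles = 0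
--     while piles < len(s) and s[piles] == s[0]:
--         piles += 1
--     return True if piles % 2 == 1 else None
-- ===== Notes on version B (the rewrite author's own statement) =====
-- stated objective: alternative
-- what changed: Instead of max() plus a counting loop, B sorts the list in descending order and counts the length of the leading run of equal elements (the multiplicity of the maximum); Pre_ excludes the inputs on which A raises (empty list: ValueError, non-positive element: AssertionError).
import Mathlib
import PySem

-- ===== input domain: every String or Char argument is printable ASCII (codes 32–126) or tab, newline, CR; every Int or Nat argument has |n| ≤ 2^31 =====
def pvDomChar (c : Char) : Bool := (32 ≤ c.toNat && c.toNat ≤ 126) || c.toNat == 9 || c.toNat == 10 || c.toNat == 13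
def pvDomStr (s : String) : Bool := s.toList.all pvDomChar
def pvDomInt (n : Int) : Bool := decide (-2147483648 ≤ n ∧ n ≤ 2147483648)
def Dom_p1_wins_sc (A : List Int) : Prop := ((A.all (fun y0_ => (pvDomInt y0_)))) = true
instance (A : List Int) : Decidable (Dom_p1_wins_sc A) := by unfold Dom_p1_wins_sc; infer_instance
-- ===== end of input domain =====

-- B replaces max()+count with sort-descending then measuring the leading equal run; alternative algorithm, no speed claim.

-- ===== PORT A =====
def p1_wins_sc (A : List Int) : Option Bool :=
  if A.length = 2 then some (decide (PySem.List.pyGet? A 0 ≠ PySem.List.pyGet? A 1))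
  else
    match PySem.List.max? A (fun y => y) with
    | none => none   -- max([]) raises ValueError; outside Pre_
    | some mA =>
      let piles : Int := A.foldl (fun piles a => if a = mA then piles + 1 else piles) 0
      if piles % 2 = 1 then some true else none

-- ===== PORT B =====
-- the while loop of Source B: walk the list front-to-back counting while the element equals s[0]
def pvPrefixRun : List Int → Int → Int
  | [], _ => 0
  | a :: t, h => if a = h then 1 + pvPrefixRun t h else 0

def p1_wins_sc_alt (A : List Int) : Option Bool :=
  if A.length = 2 then some (decide (PySem.List.pyGet? A 0 ≠ PySem.List.pyGet? A 1))
  else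
    let s := PySem.List.sorted A (fun y => y) true
    let piles : Int :=
      match s with
      | [] => 0
      | h :: _ => pvPrefixRun s h
    if piles % 2 = 1 then some true else none

-- ===== PRECONDITION & SPEC =====
-- Pre_ excludes exactly the inputs on which A raises: the empty list (ValueError from max([]))
-- and lists containing a non-positive element (AssertionError).
def Pre_p1_wins_sc (A : List Int) : Prop := A ≠ [] ∧ A.all (fun a => 0 < a) = true
instance (A : List Int) : Decidable (Pre_p1_wins_sc A) := by unfold Pre_p1_wins_sc; infer_instance
def pvWitness_p1_wins_sc : List Int := [3, 1, 3]
def Spec_p1_wins_sc (A : List Int) (out : Option Bool) : Prop := out = p1_wins_sc_alt A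
instance (A : List Int) (out : Option Bool) : Decidable (Spec_p1_wins_sc A out) := by unfold Spec_p1_wins_sc; infer_instance

-- ===== CLAIM (what is proved, stated in full; the proofs are below) =====
def Claim_equal_p1_wins_sc : Prop := ∀ (A : List Int), Dom_p1_wins_sc A → Pre_p1_wins_sc A → Spec_p1_wins_sc A (p1_wins_sc A)

-- ===== LEMMAS AND PROOFS =====

-- the counting fold with an arbitrary seed splits off the seed
theorem count_shift (t : List Int) (M : Int) : ∀ (s : Int),
    t.foldl (fun piles x => if x = M then piles + 1 else piles) s
    = s + t.foldl (fun piles x => if x = M then piles + 1 else piles) 0 := by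
  induction t with
  | nil => intro s; simp
  | cons b u ih =>
    intro s
    simp only [List.foldl_cons]
    rw [ih, ih (if b = M then (0:Int) + 1 else 0)]
    split_ifs; ring; ring

-- A's counting fold is List.count
theorem count_fold (l : List Int) (M : Int) :
    l.foldl (fun piles x => if x = M then piles + 1 else piles) 0 = (l.count M : Int) := by
  induction l with
  | nil => simp
  | cons b u ih =>
    simp only [List.foldl_cons, List.count_cons]
    rw [count_shift, ih]
    by_cases h : b = M <;> simp [h] <;> ring

-- in a descending list bounded by h, the leading run of h's is the whole count of h
theorem prefixRun_eq_count (l : List Int) (h : Int)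
    (hb : ∀ x ∈ l, x ≤ h) (hp : l.Pairwise (fun a b => b ≤ a)) :
    pvPrefixRun l h = (l.count h : Int) := by
  induction l with
  | nil => simp [pvPrefixRun]
  | cons a t ih =>
    simp only [pvPrefixRun, List.count_cons]
    rcases List.pairwise_cons.mp hp with ⟨hat, hpt⟩
    by_cases hah : a = h
    · subst hah
      rw [ih (fun x hx => hb x (List.mem_cons_of_mem _ hx)) hpt]
      simp; ring
    · have hlt : a < h := lt_of_le_of_ne (hb a (List.mem_cons_self)) hah
      have hzero : t.count h = 0 := by
        rw [List.count_eq_zero]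
        intro hmem
        have := hat h hmem
        omega
      simp [hah, hzero]

-- ===== VERDICT (by name: the statement is the Claim_ definition above) =====
theorem p1_wins_sc_spec : Claim_equal_p1_wins_sc := by
  intro A _hdom hpre
  obtain ⟨hne, _hpos⟩ := hpre
  unfold Spec_p1_wins_sc p1_wins_sc p1_wins_sc_alt
  by_cases hlen : A.length = 2
  · simp [hlen]
  · simp only [if_neg hlen]
    cases hA : A with
    | nil => exact absurd hA hne
    | cons x rest =>
      rw [PySem.List.max?_id_cons]
      set mA := rest.foldl max x with hmA
      cases hs : PySem.List.sorted (x :: rest) (fun y => y) true with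
      | nil =>
        exact absurd ((PySem.List.sorted_eq_nil_iff _ _ _).mp hs) (by simp)
      | cons h t =>
        have hperm : (PySem.List.sorted (x :: rest) (fun y => y) true).Perm (x :: rest) :=
          PySem.List.sorted_perm _ _ _
        have hhead : ∀ y ∈ (x :: rest), y ≤ h := by
          intro y hy
          exact PySem.List.key_head_sorted_rev_ge _ (fun y => y) hs y hy
        have hpair : (h :: t).Pairwise (fun a b => b ≤ a) := by
          have := PySem.List.sorted_pairwise_rev (xs := x :: rest) (key := fun y => y)
          rwa [hs] at this
        -- h = mA
        have hmem_h : h ∈ (x : Int) :: rest := by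
          have : h ∈ PySem.List.sorted (x :: rest) (fun y => y) true := by
            rw [hs]; exact List.mem_cons_self
          exact (PySem.List.mem_sorted _ _ _ _).mp this
        have hmA_mem : mA ∈ (x : Int) :: rest := by
          rcases PySem.List.foldl_max_mem rest x with hc | hc
          · rw [hmA, hc]; exact List.mem_cons_self
          · exact List.mem_cons_of_mem _ hc
        have h1 : h ≤ mA := by
          rcases PySem.List.le_foldl_max rest x with ⟨hx, hall⟩
          rcases List.mem_cons.mp hmem_h with hh | hh
          · rw [hh]; exact hx
          · exact hall h hh
        have h2 : mA ≤ h := hhead mA hmA_mem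
        have heq : h = mA := le_antisymm h1 h2
        -- counts agree
        have hbound : ∀ y ∈ (h :: t), y ≤ h := by
          intro y hy
          have : y ∈ (x : Int) :: rest := by
            have : y ∈ PySem.List.sorted (x :: rest) (fun y => y) true := by rw [hs]; exact hy
            exact (PySem.List.mem_sorted _ _ _ _).mp this
          exact le_trans (hhead y this) (le_refl h)
        have hrun : pvPrefixRun (h :: t) h = ((h :: t).count h : Int) :=
          prefixRun_eq_count _ _ hbound hpair
        have hcount : (h :: t).count mA = (x :: rest).count mA := by
          have := hperm.count_eq mA
          rwa [hs] at this
        have hfinal : pvPrefixRun (h :: t) h = ((x :: rest).count mA : Int) := by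
          rw [hrun, heq]
          rw [heq] at hcount
          rw [hcount]
        simp only [count_fold, hfinal]
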